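-- pv_equiv track=rewrite | github.com/rolansy/Xtreme | Halving.py | count_valid_permutations
-- ===== SOURCE A (Python) =====
-- MOD = 998244353
--
-- def count_valid_permutations(N, C, R, B):
--     from itertools import combinations
--
--     # Identify fixed and unfixed elements
--     fixed = [c for c in C if c != -1]
--     unfixed_positions = [i for i, c in enumerate(C) if c == -1]
--     all_elements = set(range(1, 2 * N + 1))
--     unfixed_elements = list(all_elements - set(fixed))
--
--     # Initialize DP table
--     dp = [[0] * (1 << len(unfixed_elements)) for _ in range(N + 1)]
--     dp[0][0] = 1
--
--     # Precompute pairs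
--     pairs = [(i, j) for i in range(len(unfixed_elements)) for j in range(i + 1, len(unfixed_elements))]
--
--     for i in range(N):
--         for mask in range(1 << len(unfixed_elements)):
--             if dp[i][mask] == 0:
--                 continue
--
--             for (u, v) in pairs:
--                 if (mask & (1 << u)) or (mask & (1 << v)):
--                     continue
--
--                 a1, a2 = unfixed_elements[u], unfixed_elements[v]
--                 if R[i] == 0:
--                     if min(a1, a2) == B[i]:
--                         new_mask = mask | (1 << u) | (1 << v)
--                         dp[i + 1][new_mask] = (dp[i + 1][new_mask] + dp[i][mask]) % MOD
--                 else:
--                     if max(a1, a2) == B[i]: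
--                         new_mask = mask | (1 << u) | (1 << v)
--                         dp[i + 1][new_mask] = (dp[i + 1][new_mask] + dp[i][mask]) % MOD
--
--     # Sum up valid configurations
--     result = 0
--     for mask in range(1 << len(unfixed_elements)):
--         result = (result + dp[N][mask]) % MOD
--
--     return result
-- ===== SOURCE B (Python) =====
-- MOD = 998244353
--
-- def count_valid_permutations(N, C, R, B):
--     # Sparse DP: only reachable masks are stored in a dict, the element that
--     # must equal B[i] is found via a position index built once, and only its
--     # free partners are scanned for each stored state.
--     fixed = set(c for c in C if c != -1)
--     unfixed = [x for x in range(1, 2 * N + 1) if x not in fixed]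
--     M = len(unfixed)
--     pos = {}
--     for x in unfixed:
--         pos[x] = len(pos)
--     dp = {0: 1}
--     for i in range(N):
--         bi, ri = B[i], R[i]
--         ndp = {}
--         u0 = pos.get(bi)
--         if u0 is not None:
--             b0 = 1 << u0
--             for mask, val in dp.items():
--                 if val == 0 or (mask & b0):
--                     continue
--                 for v in range(M):
--                     if v == u0 or (mask & (1 << v)):
--                         continue
--                     a = unfixed[v]
--                     if (a > bi) if ri == 0 else (a < bi):
--                         nm = mask | b0 | (1 << v)
--                         ndp[nm] = (ndp.get(nm, 0) + val) % MOD
--         dp = ndp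
--     res = 0
--     for val in dp.values():
--         res = (res + val) % MOD
--     return res
-- ===== Notes on version B (the rewrite author's own statement) =====
-- stated objective: faster
-- what changed: B replaces A's dense (N+1)x2^M table scanned over all O(M^2) precomputed index pairs per state by a sparse dict of reachable masks, a position index built once so the element that must equal B[i] is found by one hash lookup per row, and a scan over only that element's O(M) free partners, giving O(N*S*M) work over the S stored states instead of O(N*2^M*M^2).
-- outside the precondition, e.g. on count_valid_permutations(1, [1, 2], [], []): A returns 0, B raises IndexError
import Mathlib
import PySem

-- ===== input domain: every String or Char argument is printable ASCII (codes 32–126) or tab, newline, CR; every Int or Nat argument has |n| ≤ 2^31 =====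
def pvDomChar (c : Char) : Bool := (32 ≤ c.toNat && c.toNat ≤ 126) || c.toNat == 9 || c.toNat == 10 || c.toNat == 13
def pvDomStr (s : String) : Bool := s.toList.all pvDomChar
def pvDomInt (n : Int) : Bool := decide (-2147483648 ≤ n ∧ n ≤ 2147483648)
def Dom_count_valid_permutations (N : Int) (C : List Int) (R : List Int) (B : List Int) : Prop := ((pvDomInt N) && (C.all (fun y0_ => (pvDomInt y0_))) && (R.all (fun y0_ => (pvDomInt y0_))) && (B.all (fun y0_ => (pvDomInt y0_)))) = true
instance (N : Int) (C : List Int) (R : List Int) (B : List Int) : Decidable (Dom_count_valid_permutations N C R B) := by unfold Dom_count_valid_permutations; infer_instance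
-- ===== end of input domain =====

-- B replaces A's dense (N+1)-row table and O(M^2) pair scan per state by a sparse dict
-- of reachable masks, a position index built once to locate the element that must equal
-- B[i], and a scan over only that element's free partners.  (Equivalence of the return
-- value; neither program mutates its arguments.)

def pvMOD : Int := 998244353

-- shared arithmetic helper of port A: dp[nm] = (dp[nm] + x) % MOD
def pvBump (d : List Int) (nm : Nat) (x : Int) : List Int :=
  d.set nm (PySem.Int.mod (d.getD nm 0 + x) pvMOD)

-- ===== PORT A =====
-- pairs = [(i, j) for i in range(M) for j in range(i + 1, M)]
def pvPairs (M : Nat) : List (Nat × Nat) :=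
  (List.range M).flatMap (fun u => (List.range' (u + 1) (M - (u + 1))).map (fun v => (u, v)))

def pvInnerA (unf : List Int) (ri bi x : Int) (mask : Nat) (nxt : List Int) : List Int :=
  (pvPairs unf.length).foldl (fun nxt p =>
    if mask &&& (1 <<< p.1) ≠ 0 ∨ mask &&& (1 <<< p.2) ≠ 0 then nxt
    else
      let a1 := unf.getD p.1 0
      let a2 := unf.getD p.2 0
      if ri = 0 then
        if min a1 a2 = bi then pvBump nxt (mask ||| (1 <<< p.1) ||| (1 <<< p.2)) x else nxt
      else
        if max a1 a2 = bi then pvBump nxt (mask ||| (1 <<< p.1) ||| (1 <<< p.2)) x else nxt) nxt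

def pvStepA (unf : List Int) (ri bi : Int) (cur : List Int) : List Int :=
  (List.range (2 ^ unf.length)).foldl (fun nxt mask =>
    if cur.getD mask 0 = 0 then nxt
    else pvInnerA unf ri bi (cur.getD mask 0) mask nxt)
    (List.replicate (2 ^ unf.length) 0)

def count_valid_permutations (N : Int) (C : List Int) (R : List Int) (B : List Int) : Int :=
  let fixed := C.filter (fun c => c ≠ -1)
  let unfixed : List Int :=
    PySem.Set.diff (PySem.Set.ofList (PySem.List.pyRange 1 (2 * N + 1) 1)) (PySem.Set.ofList fixed)
  let dp0 : List Int := (List.replicate (2 ^ unfixed.length) 0).set 0 1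
  let dpN := (List.range N.toNat).foldl
    (fun cur i => pvStepA unfixed (R.getD i 0) (B.getD i 0) cur) dp0
  (List.range (2 ^ unfixed.length)).foldl (fun r mask => PySem.Int.mod (r + dpN.getD mask 0) pvMOD) 0

-- ===== PORT B =====
-- one row of the sparse DP: iterate the stored (mask, value) items of the dict
def pvDStep (unf : List Int) (pos : PySem.Dict Int Nat) (ri bi : Int)
    (dp : PySem.Dict Nat Int) : PySem.Dict Nat Int :=
  match pos.get? bi with
  | none => PySem.Dict.empty
  | some u0 =>
    dp.items.foldl (fun (ndp : PySem.Dict Nat Int) (p : Nat × Int) =>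
      if p.2 = 0 ∨ p.1 &&& (1 <<< u0) ≠ 0 then ndp
      else (List.range unf.length).foldl (fun (ndp : PySem.Dict Nat Int) (v : Nat) =>
        if v = u0 ∨ p.1 &&& (1 <<< v) ≠ 0 then ndp
        else
          let a := unf.getD v 0
          if (if ri = 0 then bi < a else a < bi) then
            let nm := p.1 ||| (1 <<< u0) ||| (1 <<< v)
            PySem.Dict.insert ndp nm (PySem.Int.mod (ndp.getD nm 0 + p.2) pvMOD)
          else ndp) ndp)
      PySem.Dict.empty

def count_valid_permutations_alt (N : Int) (C : List Int) (R : List Int) (B : List Int) : Int :=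
  let fixed := PySem.Set.ofList (C.filter (fun c => c ≠ -1))
  let unfixed : List Int :=
    (PySem.List.pyRange 1 (2 * N + 1) 1).filter (fun x => ¬ PySem.Set.contains fixed x)
  let pos : PySem.Dict Int Nat :=
    unfixed.foldl (fun d x => PySem.Dict.insert d x d.size) PySem.Dict.empty
  let dpN := (List.range N.toNat).foldl
    (fun dp i => pvDStep unfixed pos (R.getD i 0) (B.getD i 0) dp)
    (PySem.Dict.insert PySem.Dict.empty 0 1)
  dpN.values.foldl (fun r v => PySem.Int.mod (r + v) pvMOD) 0

-- ===== PRECONDITION & SPEC =====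
-- Pre_ excludes N < 0 (A's dp[0][0] = 1 raises IndexError) and R or B shorter than N:
-- there A raises IndexError whenever the DP reaches a state with a free pair; in the
-- corner with fewer than two unfixed elements A returns 0 without reading R/B, but B
-- reads B[i] and R[i] on every round and raises there.
def Pre_count_valid_permutations (N : Int) (C : List Int) (R : List Int) (B : List Int) : Prop :=
  0 ≤ N ∧ N ≤ (R.length : Int) ∧ N ≤ (B.length : Int)
instance (N : Int) (C : List Int) (R : List Int) (B : List Int) : Decidable (Pre_count_valid_permutations N C R B) := by unfold Pre_count_valid_permutations; infer_instance

def pvWitness_count_valid_permutations : Int × List Int × List Int × List Int :=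
  (1, [-1, -1], [0], [1])

def Spec_count_valid_permutations (N : Int) (C : List Int) (R : List Int) (B : List Int) (out : Int) : Prop := out = count_valid_permutations_alt N C R B
instance (N : Int) (C : List Int) (R : List Int) (B : List Int) (out : Int) : Decidable (Spec_count_valid_permutations N C R B out) := by unfold Spec_count_valid_permutations; infer_instance

-- ===== CLAIM (what is proved, stated in full; the proofs are below) =====
def Claim_equal_count_valid_permutations : Prop := ∀ (N : Int) (C : List Int) (R : List Int) (B : List Int), Dom_count_valid_permutations N C R B → Pre_count_valid_permutations N C R B → Spec_count_valid_permutations N C R B (count_valid_permutations N C R B)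

-- ===== LEMMAS AND PROOFS =====

-- list-indexed form of B's row transition, used only inside the proofs as a bridge
-- between A's dense table and B's sparse dict
def pvInnerB (unf : List Int) (ri bi x : Int) (u0 mask : Nat) (nxt : List Int) : List Int :=
  (List.range unf.length).foldl (fun nxt v =>
    if v = u0 ∨ mask &&& (1 <<< v) ≠ 0 then nxt
    else
      let a := unf.getD v 0
      if (if ri = 0 then bi < a else a < bi) then
        pvBump nxt (mask ||| (1 <<< u0) ||| (1 <<< v)) x
      else nxt) nxt

def pvStepB (unf : List Int) (ri bi : Int) (cur : List Int) : List Int :=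
  match PySem.List.index? unf bi with
  | none => List.replicate (2 ^ unf.length) 0
  | some u0 =>
    (List.range (2 ^ unf.length)).foldl (fun nxt mask =>
      if cur.getD mask 0 = 0 ∨ mask &&& (1 <<< u0) ≠ 0 then nxt
      else pvInnerB unf ri bi (cur.getD mask 0) u0 mask nxt)
      (List.replicate (2 ^ unf.length) 0)

theorem mem_pvPairs {M : Nat} {p : Nat × Nat} :
    p ∈ pvPairs M ↔ p.1 < p.2 ∧ p.2 < M := by
  obtain ⟨u, v⟩ := p
  simp [pvPairs, List.mem_flatMap, List.mem_range, List.mem_range']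
  constructor
  · rintro ⟨a, ha, b, hb, h1, h2⟩; omega
  · rintro ⟨h1, h2⟩; exact ⟨by omega, v - (u + 1), by omega, by omega⟩

theorem nodup_pvPairs (M : Nat) : (pvPairs M).Nodup := by
  rw [pvPairs, List.nodup_flatMap]
  constructor
  · intro u _
    exact (List.nodup_range').map (fun a b h => by simpa using congrArg Prod.snd h)
  · refine List.Pairwise.imp ?_ List.pairwise_lt_range
    intro a b hab x hx hx'
    simp [List.mem_map] at hx hx'
    obtain ⟨v, _, rfl⟩ := hx
    obtain ⟨v', _, h⟩ := hx'
    exact absurd (congrArg Prod.fst h).symm (by simp; omega)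

theorem pv_bit_inj {mask u0 w w' : Nat} (hw : ¬ mask.testBit w) (h1 : w ≠ u0)
    (heq : mask ||| (1 <<< u0) ||| (1 <<< w) = mask ||| (1 <<< u0) ||| (1 <<< w')) : w = w' := by
  have h3 := congrArg (fun n => n.testBit w) heq
  simp [Nat.testBit_or, Nat.shiftLeft_eq, Nat.testBit_two_pow, hw, Ne.symm h1] at h3
  exact h3.symm

theorem pv_and_iff (m w : Nat) : (m &&& (1 <<< w) ≠ 0) ↔ m.testBit w := by
  rw [Nat.shiftLeft_eq, one_mul, Nat.and_two_pow]
  cases h : m.testBit w <;> simp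

theorem pv_or_swap (m a b : Nat) : m ||| a ||| b = m ||| b ||| a := by
  rw [Nat.or_assoc, Nat.or_assoc, Nat.or_comm a b]

theorem pv_mod_add_mod (a y : Int) :
    PySem.Int.mod (PySem.Int.mod a pvMOD + y) pvMOD = PySem.Int.mod (a + y) pvMOD := by
  have h : (0:Int) < pvMOD := by norm_num [pvMOD]
  simp only [PySem.Int.mod_eq_emod_of_pos h]
  exact Int.emod_add_emod _ _ _

theorem pvBump_comm2 (d : List Int) (n1 n2 : Nat) (x y : Int) :
    pvBump (pvBump d n1 x) n2 y = pvBump (pvBump d n2 y) n1 x := by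
  by_cases h : n1 = n2
  · subst h
    by_cases hlt : n1 < d.length
    · unfold pvBump
      have h1 : ∀ z : Int, (d.set n1 z).getD n1 0 = z := by
        intro z; simp [List.getD, List.getElem?_set_self hlt]
      rw [List.set_set, List.set_set, h1, h1, pv_mod_add_mod, pv_mod_add_mod, add_right_comm]
    · push_neg at hlt
      have h2 : ∀ z : Int, d.set n1 z = d := fun z => List.set_eq_of_length_le hlt
      simp [pvBump, h2]
  · unfold pvBump
    rw [List.set_comm _ _ h]
    congr 2
    · simp [List.getD, List.getElem?_set_ne h]
    · simp [List.getD, List.getElem?_set_ne (Ne.symm h)]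

theorem foldl_perm_of_comm {α β : Type} (f : β → α → β)
    (hf : ∀ b a1 a2, f (f b a1) a2 = f (f b a2) a1) {l1 l2 : List α}
    (h : l1.Perm l2) : ∀ init, l1.foldl f init = l2.foldl f init := by
  induction h with
  | nil => intro _; rfl
  | cons x _ ih => intro init; simp only [List.foldl_cons]; exact ih _
  | swap x y _ => intro init; simp only [List.foldl_cons, hf]
  | trans _ _ ih1 ih2 => intro init; rw [ih1, ih2]

theorem pvInner_eq (unf : List Int) (hnd : unf.Nodup) (ri bi x : Int) (u0 mask : Nat)
    (hidx : PySem.List.index? unf bi = some u0) (hfree : mask &&& (1 <<< u0) = 0)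
    (nxt : List Int) :
    pvInnerA unf ri bi x mask nxt = pvInnerB unf ri bi x u0 mask nxt := by
  obtain ⟨hk, hval, _⟩ := PySem.List.getElem_of_index?_eq_some hidx
  have huniq : ∀ j, (hj : j < unf.length) → unf[j] = bi → j = u0 := by
    intro j hj hjv
    exact (List.Nodup.getElem_inj_iff hnd).mp (hjv.trans hval.symm)
  have hfree' : ¬ mask.testBit u0 := by
    intro h; exact absurd hfree ((pv_and_iff mask u0).mpr h |> fun h2 => h2)
  set P : Nat → Prop := fun v => ¬(v = u0 ∨ mask &&& (1 <<< v) ≠ 0) ∧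
      (if ri = 0 then bi < unf.getD v 0 else unf.getD v 0 < bi) with hP
  set GA : Nat × Nat → Prop := fun p =>
      ¬(mask &&& (1 <<< p.1) ≠ 0 ∨ mask &&& (1 <<< p.2) ≠ 0) ∧
      (if ri = 0 then min (unf.getD p.1 0) (unf.getD p.2 0) = bi
       else max (unf.getD p.1 0) (unf.getD p.2 0) = bi) with hGA
  have hchar : ∀ p : Nat × Nat, p ∈ pvPairs unf.length →
      (GA p ↔ ((p.1 = u0 ∧ P p.2) ∨ (p.2 = u0 ∧ P p.1))) := by
    intro ⟨u, v⟩ hp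
    obtain ⟨huv, hvM⟩ := mem_pvPairs.mp hp
    have huM : u < unf.length := lt_trans huv hvM
    have hgu : unf.getD u 0 = unf[u] := List.getD_eq_getElem unf 0 huM
    have hgv : unf.getD v 0 = unf[v] := List.getD_eq_getElem unf 0 hvM
    have hne : unf.getD u 0 ≠ unf.getD v 0 := by
      rw [hgu, hgv]
      intro h; exact absurd ((List.Nodup.getElem_inj_iff hnd).mp h) (by omega)
    constructor
    · rintro ⟨hfree2, hcond⟩
      push_neg at hfree2
      obtain ⟨hfu, hfv⟩ := hfree2
      rcases lt_trichotomy (unf.getD u 0) (unf.getD v 0) with hlt | heq | hgt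
      · by_cases hri : ri = 0 <;> simp only [hri, reduceIte] at hcond ⊢
        · rw [min_eq_left hlt.le] at hcond
          have hu0 : u = u0 := huniq u huM (by rw [← hgu]; exact hcond)
          exact Or.inl ⟨hu0, by push_neg; exact ⟨by omega, hfv⟩, by rw [if_pos hri]; omega⟩
        · rw [max_eq_right hlt.le] at hcond
          have hv0 : v = u0 := huniq v hvM (by rw [← hgv]; exact hcond)
          exact Or.inr ⟨hv0, by push_neg; exact ⟨by omega, hfu⟩, by simp only [hri, reduceIte]; omega⟩
      · exact absurd heq hne
      · by_cases hri : ri = 0 <;> simp only [hri, reduceIte] at hcond ⊢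
        · rw [min_eq_right hgt.le] at hcond
          have hv0 : v = u0 := huniq v hvM (by rw [← hgv]; exact hcond)
          exact Or.inr ⟨hv0, by push_neg; exact ⟨by omega, hfu⟩, by rw [if_pos hri]; omega⟩
        · rw [max_eq_left hgt.le] at hcond
          have hu0 : u = u0 := huniq u huM (by rw [← hgu]; exact hcond)
          exact Or.inl ⟨hu0, by push_neg; exact ⟨by omega, hfv⟩, by simp only [hri, reduceIte]; omega⟩
    · rintro (⟨h1, h2⟩ | ⟨h1, h2⟩)
      · obtain ⟨hfv2, hcmp⟩ := h2
        push_neg at hfv2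
        subst h1
        have hbu : unf.getD u 0 = bi := by rw [hgu]; exact hval
        refine ⟨by push_neg; exact ⟨hfree, hfv2.2⟩, ?_⟩
        by_cases hri : ri = 0 <;> simp only [hri, reduceIte] at hcmp ⊢ <;>
          [rw [min_eq_left (by omega)]; rw [max_eq_left (by omega)]] <;> exact hbu
      · obtain ⟨hfv2, hcmp⟩ := h2
        push_neg at hfv2
        subst h1
        have hbv : unf.getD v 0 = bi := by rw [hgv]; exact hval
        refine ⟨by push_neg; exact ⟨hfv2.2, hfree⟩, ?_⟩
        by_cases hri : ri = 0 <;> simp only [hri, reduceIte] at hcmp ⊢ <;>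
          [rw [min_eq_right (by omega)]; rw [max_eq_right (by omega)]] <;> exact hbv
  have hPfacts : ∀ w, P w → w ≠ u0 ∧ ¬ mask.testBit w := by
    intro w hw
    obtain ⟨h1, _⟩ := hw
    push_neg at h1
    exact ⟨h1.1, fun ht => absurd h1.2 ((pv_and_iff mask w).mpr ht)⟩
  have hnm : ∀ p, p ∈ pvPairs unf.length → GA p → ∃ w, w ≠ u0 ∧ ¬ mask.testBit w ∧
      w < unf.length ∧ P w ∧
      (mask ||| (1 <<< p.1) ||| (1 <<< p.2)) = mask ||| (1 <<< u0) ||| (1 <<< w) ∧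
      (p = (u0, w) ∨ p = (w, u0)) := by
    intro p hp hga
    obtain ⟨hlt, hub⟩ := mem_pvPairs.mp hp
    rcases (hchar p hp).mp hga with ⟨h1, h2⟩ | ⟨h1, h2⟩
    · obtain ⟨hne0, htb⟩ := hPfacts _ h2
      refine ⟨p.2, hne0, htb, hub, h2, by rw [h1], Or.inl ?_⟩
      rw [← h1]
    · obtain ⟨hne0, htb⟩ := hPfacts _ h2
      refine ⟨p.1, hne0, htb, by omega, h2, by rw [h1, pv_or_swap], Or.inr ?_⟩
      rw [← h1]
  have hcomm : ∀ (b : List Int) (a1 a2 : Nat),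
      pvBump (pvBump b a1 x) a2 x = pvBump (pvBump b a2 x) a1 x :=
    fun b a1 a2 => pvBump_comm2 b a1 a2 x x
  rw [pvInnerA, pvInnerB]
  have hbodyA : ∀ (acc : List Int), ∀ p ∈ pvPairs unf.length,
      (if mask &&& (1 <<< p.1) ≠ 0 ∨ mask &&& (1 <<< p.2) ≠ 0 then acc
       else
         let a1 := unf.getD p.1 0
         let a2 := unf.getD p.2 0
         if ri = 0 then
           if min a1 a2 = bi then pvBump acc (mask ||| (1 <<< p.1) ||| (1 <<< p.2)) x else acc
         else
           if max a1 a2 = bi then pvBump acc (mask ||| (1 <<< p.1) ||| (1 <<< p.2)) x else acc)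
      = if GA p then pvBump acc (mask ||| (1 <<< p.1) ||| (1 <<< p.2)) x else acc := by
    intro acc p _
    by_cases h1 : mask &&& (1 <<< p.1) ≠ 0 ∨ mask &&& (1 <<< p.2) ≠ 0
    · rw [if_pos h1, if_neg (by rw [hGA]; rintro ⟨h2, _⟩; exact h2 h1)]
    · rw [if_neg h1]
      by_cases hri : ri = 0
      · simp only [hri, reduceIte]
        by_cases h2 : min (unf.getD p.1 0) (unf.getD p.2 0) = bi
        · rw [if_pos h2, if_pos (by rw [hGA]; exact ⟨h1, by rw [if_pos hri]; exact h2⟩)]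
        · rw [if_neg h2, if_neg (by rw [hGA]; rintro ⟨_, h3⟩; rw [if_pos hri] at h3; exact h2 h3)]
      · simp only [hri, reduceIte]
        by_cases h2 : max (unf.getD p.1 0) (unf.getD p.2 0) = bi
        · rw [if_pos h2, if_pos (by rw [hGA]; exact ⟨h1, by rw [if_neg hri]; exact h2⟩)]
        · rw [if_neg h2, if_neg (by rw [hGA]; rintro ⟨_, h3⟩; rw [if_neg hri] at h3; exact h2 h3)]
  have hbodyB : ∀ (acc : List Int), ∀ v ∈ List.range unf.length,
      (if v = u0 ∨ mask &&& (1 <<< v) ≠ 0 then acc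
       else
         let a := unf.getD v 0
         if (if ri = 0 then bi < a else a < bi) then
           pvBump acc (mask ||| (1 <<< u0) ||| (1 <<< v)) x
         else acc)
      = if P v then pvBump acc (mask ||| (1 <<< u0) ||| (1 <<< v)) x else acc := by
    intro acc v _
    by_cases h1 : v = u0 ∨ mask &&& (1 <<< v) ≠ 0
    · rw [if_pos h1, if_neg (by rw [hP]; rintro ⟨h2, _⟩; exact h2 h1)]
    · rw [if_neg h1]
      by_cases h2 : if ri = 0 then bi < unf.getD v 0 else unf.getD v 0 < bi
      · rw [if_pos h2, if_pos (by rw [hP]; exact ⟨h1, h2⟩)]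
      · rw [if_neg h2, if_neg (by rw [hP]; rintro ⟨_, h3⟩; exact h2 h3)]
  rw [PySem.List.foldl_congr_mem _ _ _ nxt hbodyA,
      PySem.List.foldl_congr_mem _ _ _ nxt hbodyB,
      PySem.List.foldl_ite_eq_foldl_filter GA _ _ nxt,
      PySem.List.foldl_ite_eq_foldl_filter P _ _ nxt]
  rw [show (fun (acc : List Int) (p : Nat × Nat) => pvBump acc (mask ||| (1 <<< p.1) ||| (1 <<< p.2)) x)
        = (fun acc p => (fun a n => pvBump a n x) acc ((fun (p : Nat × Nat) => mask ||| (1 <<< p.1) ||| (1 <<< p.2)) p)) from rfl,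
      ← List.foldl_map (f := fun (p : Nat × Nat) => mask ||| (1 <<< p.1) ||| (1 <<< p.2)) (g := fun a n => pvBump a n x)]
  rw [show (fun (acc : List Int) (v : Nat) => pvBump acc (mask ||| (1 <<< u0) ||| (1 <<< v)) x)
        = (fun acc v => (fun a n => pvBump a n x) acc ((fun (v : Nat) => mask ||| (1 <<< u0) ||| (1 <<< v)) v)) from rfl,
      ← List.foldl_map (f := fun (v : Nat) => mask ||| (1 <<< u0) ||| (1 <<< v)) (g := fun a n => pvBump a n x)]
  refine foldl_perm_of_comm _ hcomm ?_ nxt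
  have hndA : (((pvPairs unf.length).filter (fun p => decide (GA p))).map
      (fun (p : Nat × Nat) => mask ||| (1 <<< p.1) ||| (1 <<< p.2))).Nodup := by
    refine List.Nodup.map_on ?_ (List.Nodup.filter _ (nodup_pvPairs unf.length))
    intro p hp q hq hpq
    rw [List.mem_filter] at hp hq
    obtain ⟨wp, hwp0, hwptb, _, _, hwpnm, hwpshape⟩ := hnm p hp.1 (by simpa using hp.2)
    obtain ⟨wq, hwq0, hwqtb, _, _, hwqnm, hwqshape⟩ := hnm q hq.1 (by simpa using hq.2)
    have hww : wp = wq := pv_bit_inj hwptb hwp0 (by rw [← hwpnm, ← hwqnm, hpq])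
    subst hww
    obtain ⟨hp1, hp2⟩ := mem_pvPairs.mp hp.1
    obtain ⟨hq1, hq2⟩ := mem_pvPairs.mp hq.1
    rcases hwpshape with h | h <;> rcases hwqshape with h' | h' <;> rw [h, h'] <;>
      rw [h] at hp1 <;> rw [h'] at hq1 <;> simp at hp1 hq1 ⊢ <;> omega
  have hndB : (((List.range unf.length).filter (fun v => decide (P v))).map
      (fun (v : Nat) => mask ||| (1 <<< u0) ||| (1 <<< v))).Nodup := by
    refine List.Nodup.map_on ?_ (List.Nodup.filter _ (List.nodup_range))
    intro p hp q hq hpq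
    rw [List.mem_filter] at hp hq
    obtain ⟨hp0, hptb⟩ := hPfacts p (by simpa using hp.2)
    exact pv_bit_inj hptb hp0 hpq
  rw [List.perm_ext_iff_of_nodup hndA hndB]
  intro y
  simp only [List.mem_map, List.mem_filter, List.mem_range, decide_eq_true_eq]
  constructor
  · rintro ⟨p, ⟨hp, hga⟩, rfl⟩
    obtain ⟨w, hw0, hwtb, hwM, hwP, hwnm, _⟩ := hnm p hp hga
    exact ⟨w, ⟨hwM, hwP⟩, hwnm.symm⟩
  · rintro ⟨w, ⟨hwM, hwP⟩, rfl⟩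
    obtain ⟨hw0, _⟩ := hPfacts w hwP
    by_cases hlt : w < u0
    · refine ⟨(w, u0), ⟨mem_pvPairs.mpr ⟨hlt, hk⟩, ?_⟩, by simp [pv_or_swap]⟩
      exact (hchar (w, u0) (mem_pvPairs.mpr ⟨hlt, hk⟩)).mpr (Or.inr ⟨rfl, hwP⟩)
    · have hgt : u0 < w := by omega
      refine ⟨(u0, w), ⟨mem_pvPairs.mpr ⟨hgt, hwM⟩, ?_⟩, rfl⟩
      exact (hchar (u0, w) (mem_pvPairs.mpr ⟨hgt, hwM⟩)).mpr (Or.inl ⟨rfl, hwP⟩)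

theorem pv_foldl_id {α β : Type} (l : List α) (init : β) :
    l.foldl (fun acc _ => acc) init = init := by
  induction l generalizing init with
  | nil => rfl
  | cons a t ih => simpa using ih init

theorem pvInnerA_id_of_absent (unf : List Int) (ri bi x : Int) (mask : Nat)
    (habs : bi ∉ unf) (nxt : List Int) : pvInnerA unf ri bi x mask nxt = nxt := by
  rw [pvInnerA, PySem.List.foldl_congr_mem _ _ (fun acc _ => acc) nxt ?_, pv_foldl_id]
  intro acc p hp
  obtain ⟨hlt, hub⟩ := mem_pvPairs.mp hp
  have h1 : unf.getD p.1 0 ∈ unf := by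
    rw [List.getD_eq_getElem unf 0 (by omega)]; exact List.getElem_mem _
  have h2 : unf.getD p.2 0 ∈ unf := by
    rw [List.getD_eq_getElem unf 0 hub]; exact List.getElem_mem _
  by_cases hg : mask &&& (1 <<< p.1) ≠ 0 ∨ mask &&& (1 <<< p.2) ≠ 0
  · rw [if_pos hg]
  · rw [if_neg hg]
    by_cases hri : ri = 0 <;> simp only [hri, reduceIte]
    · rw [if_neg ?_]
      rcases min_choice (unf.getD p.1 0) (unf.getD p.2 0) with hm | hm <;> rw [hm] <;>
        intro hc <;> [exact habs (by rw [← hc]; exact h1); exact habs (by rw [← hc]; exact h2)]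
    · rw [if_neg ?_]
      rcases max_choice (unf.getD p.1 0) (unf.getD p.2 0) with hm | hm <;> rw [hm] <;>
        intro hc <;> [exact habs (by rw [← hc]; exact h1); exact habs (by rw [← hc]; exact h2)]

theorem pvInnerA_id_of_taken (unf : List Int) (hnd : unf.Nodup) (ri bi x : Int) (u0 mask : Nat)
    (hidx : PySem.List.index? unf bi = some u0) (htaken : mask &&& (1 <<< u0) ≠ 0)
    (nxt : List Int) : pvInnerA unf ri bi x mask nxt = nxt := by
  obtain ⟨hk, hval, _⟩ := PySem.List.getElem_of_index?_eq_some hidx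
  have huniq : ∀ j, (hj : j < unf.length) → unf[j] = bi → j = u0 := by
    intro j hj hjv
    exact (List.Nodup.getElem_inj_iff hnd).mp (hjv.trans hval.symm)
  rw [pvInnerA, PySem.List.foldl_congr_mem _ _ (fun acc _ => acc) nxt ?_, pv_foldl_id]
  intro acc p hp
  obtain ⟨hlt, hub⟩ := mem_pvPairs.mp hp
  by_cases hg : mask &&& (1 <<< p.1) ≠ 0 ∨ mask &&& (1 <<< p.2) ≠ 0
  · rw [if_pos hg]
  · rw [if_neg hg]
    push_neg at hg
    have hg1 : p.1 ≠ u0 := fun h => htaken (h ▸ hg.1)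
    have hg2 : p.2 ≠ u0 := fun h => htaken (h ▸ hg.2)
    have hn1 : unf.getD p.1 0 ≠ bi := by
      rw [List.getD_eq_getElem unf 0 (by omega)]
      intro h; exact hg1 (huniq _ (by omega) h)
    have hn2 : unf.getD p.2 0 ≠ bi := by
      rw [List.getD_eq_getElem unf 0 hub]
      intro h; exact hg2 (huniq _ hub h)
    by_cases hri : ri = 0 <;> simp only [hri, reduceIte]
    · rw [if_neg ?_]
      rcases min_choice (unf.getD p.1 0) (unf.getD p.2 0) with hm | hm <;> rw [hm] <;> assumption
    · rw [if_neg ?_]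
      rcases max_choice (unf.getD p.1 0) (unf.getD p.2 0) with hm | hm <;> rw [hm] <;> assumption

theorem pvStep_eq (unf : List Int) (hnd : unf.Nodup) (ri bi : Int) (cur : List Int) :
    pvStepA unf ri bi cur = pvStepB unf ri bi cur := by
  rw [pvStepA, pvStepB]
  cases hidx : PySem.List.index? unf bi with
  | none =>
    have habs : bi ∉ unf := (PySem.List.index?_eq_none_iff unf bi).mp hidx
    rw [PySem.List.foldl_congr_mem _ _ (fun acc _ => acc) _ ?_, pv_foldl_id]
    intro acc mask _
    by_cases hz : cur.getD mask 0 = 0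
    · rw [if_pos hz]
    · rw [if_neg hz]; exact pvInnerA_id_of_absent unf ri bi _ mask habs acc
  | some u0 =>
    refine PySem.List.foldl_congr_mem _ _ _ _ ?_
    intro acc mask _
    by_cases hz : cur.getD mask 0 = 0
    · rw [if_pos hz, if_pos (Or.inl hz)]
    · rw [if_neg hz]
      by_cases ht : mask &&& (1 <<< u0) ≠ 0
      · rw [if_pos (Or.inr ht)]
        exact pvInnerA_id_of_taken unf hnd ri bi _ u0 mask hidx ht acc
      · rw [if_neg (by rintro (h | h); exact hz h; exact ht h)]
        exact pvInner_eq unf hnd ri bi _ u0 mask hidx (by omega) acc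

-- ---- commutation of B's list-form inner transition ----

theorem pvInnerB_pvBump (unf : List Int) (ri bi x : Int) (u0 mask : Nat) (n : Nat) (y : Int) :
    ∀ L : List Int, pvInnerB unf ri bi x u0 mask (pvBump L n y)
      = pvBump (pvInnerB unf ri bi x u0 mask L) n y := by
  unfold pvInnerB
  generalize (List.range unf.length) = l
  induction l with
  | nil => intro L; rfl
  | cons v t ih =>
    intro L
    simp only [List.foldl_cons]
    by_cases h1 : v = u0 ∨ mask &&& (1 <<< v) ≠ 0
    · rw [if_pos h1, if_pos h1]; exact ih L
    · rw [if_neg h1, if_neg h1]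
      by_cases h2 : (if ri = 0 then bi < unf.getD v 0 else unf.getD v 0 < bi)
      · rw [if_pos h2, if_pos h2, pvBump_comm2]; exact ih _
      · rw [if_neg h2, if_neg h2]; exact ih L

theorem pv_comm_fold {α : Type} (F : List Int → List Int)
    (hF : ∀ (L : List Int) (n : Nat) (y : Int), F (pvBump L n y) = pvBump (F L) n y) :
    ∀ (l : List α) (g : List Int → α → List Int),
    (∀ a ∈ l, (∀ L, g L a = L) ∨ (∃ n y, ∀ L, g L a = pvBump L n y)) →
    ∀ L, F (l.foldl g L) = l.foldl g (F L) := by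
  intro l
  induction l with
  | nil => intro g _ L; rfl
  | cons a t ih =>
    intro g hg L
    simp only [List.foldl_cons]
    have hstep : F (g L a) = g (F L) a := by
      rcases hg a (List.mem_cons_self) with h | ⟨n, y, h⟩
      · rw [h, h]
      · rw [h, h, hF]
    rw [ih g (fun b hb => hg b (List.mem_cons_of_mem _ hb)) (g L a), hstep]

theorem pvInnerB_comm (unf : List Int) (ri bi x1 x2 : Int) (u0 m1 m2 : Nat) (L : List Int) :
    pvInnerB unf ri bi x1 u0 m1 (pvInnerB unf ri bi x2 u0 m2 L)
      = pvInnerB unf ri bi x2 u0 m2 (pvInnerB unf ri bi x1 u0 m1 L) := by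
  have hF : ∀ (L : List Int) (n : Nat) (y : Int),
      pvInnerB unf ri bi x1 u0 m1 (pvBump L n y) = pvBump (pvInnerB unf ri bi x1 u0 m1 L) n y :=
    fun L n y => pvInnerB_pvBump unf ri bi x1 u0 m1 n y L
  have hg : ∀ v ∈ List.range unf.length,
      (∀ L : List Int, (if v = u0 ∨ m2 &&& (1 <<< v) ≠ 0 then L
        else
          let a := unf.getD v 0
          if (if ri = 0 then bi < a else a < bi) then
            pvBump L (m2 ||| (1 <<< u0) ||| (1 <<< v)) x2
          else L) = L) ∨
      (∃ n y, ∀ L : List Int, (if v = u0 ∨ m2 &&& (1 <<< v) ≠ 0 then L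
        else
          let a := unf.getD v 0
          if (if ri = 0 then bi < a else a < bi) then
            pvBump L (m2 ||| (1 <<< u0) ||| (1 <<< v)) x2
          else L) = pvBump L n y) := by
    intro v _
    by_cases h1 : v = u0 ∨ m2 &&& (1 <<< v) ≠ 0
    · exact Or.inl (fun L => by rw [if_pos h1])
    · by_cases h2 : (if ri = 0 then bi < unf.getD v 0 else unf.getD v 0 < bi)
      · exact Or.inr ⟨m2 ||| (1 <<< u0) ||| (1 <<< v), x2, fun L => by rw [if_neg h1, if_pos h2]⟩
      · exact Or.inl (fun L => by rw [if_neg h1, if_neg h2])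
  exact pv_comm_fold (pvInnerB unf ri bi x1 u0 m1) hF (List.range unf.length) _ hg L

-- ---- the dict / dense-row simulation relation ----

def pvRel (M : Nat) (d : PySem.Dict Nat Int) (L : List Int) : Prop :=
  L.length = 2 ^ M ∧ d.keys.Nodup ∧ (∀ k ∈ d.keys, k < 2 ^ M) ∧
    (∀ m : Nat, d.getD m 0 = L.getD m 0)

theorem pvRel_bump {M : Nat} {d : PySem.Dict Nat Int} {L : List Int} (h : pvRel M d L)
    (nm : Nat) (hnm : nm < 2 ^ M) (x : Int) :
    pvRel M (PySem.Dict.insert d nm (PySem.Int.mod (d.getD nm 0 + x) pvMOD)) (pvBump L nm x) := by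
  obtain ⟨hlen, hnd, hbound, hpt⟩ := h
  refine ⟨by rw [pvBump, List.length_set, hlen], PySem.Dict.nodup_keys_insert d nm _ hnd, ?_, ?_⟩
  · intro k hk
    rcases (PySem.Dict.mem_keys_insert d nm k _).mp hk with rfl | hk'
    · exact hnm
    · exact hbound k hk'
  · intro m
    rw [PySem.Dict.getD_insert]
    by_cases hm : m = nm
    · subst hm
      rw [if_pos rfl, hpt m, pvBump]
      simp [List.getD, List.getElem?_set_self (show m < L.length by omega)]
    · rw [if_neg hm, hpt m, pvBump]
      simp [List.getD, List.getElem?_set_ne (Ne.symm hm)]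

theorem pvRel_foldl {α : Type} (M : Nat) :
    ∀ (l : List α) (f : PySem.Dict Nat Int → α → PySem.Dict Nat Int)
      (g : List Int → α → List Int),
    (∀ (d : PySem.Dict Nat Int) (L : List Int) (a : α), a ∈ l → pvRel M d L → pvRel M (f d a) (g L a)) →
    ∀ d L, pvRel M d L → pvRel M (l.foldl f d) (l.foldl g L) := by
  intro l
  induction l with
  | nil => intro f g _ d L hr; exact hr
  | cons a t ih =>
    intro f g h d L hr
    simp only [List.foldl_cons]
    exact ih f g (fun d L b hb => h d L b (List.mem_cons_of_mem _ hb)) _ _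
      (h d L a (List.mem_cons_self) hr)

theorem pvRel_inner (M : Nat) (unf : List Int) (hM : unf.length = M) (ri bi x : Int)
    (u0 : Nat) (hu0 : u0 < M) (mask : Nat) (hmask : mask < 2 ^ M)
    {d : PySem.Dict Nat Int} {L : List Int} (h : pvRel M d L) :
    pvRel M ((List.range unf.length).foldl (fun ndp v =>
        if v = u0 ∨ mask &&& (1 <<< v) ≠ 0 then ndp
        else
          let a := unf.getD v 0
          if (if ri = 0 then bi < a else a < bi) then
            let nm := mask ||| (1 <<< u0) ||| (1 <<< v)
            PySem.Dict.insert ndp nm (PySem.Int.mod (ndp.getD nm 0 + x) pvMOD)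
          else ndp) d)
      (pvInnerB unf ri bi x u0 mask L) := by
  rw [pvInnerB]
  refine pvRel_foldl M (List.range unf.length) _ _ ?_ d L h
  intro d L v hv hr
  rw [List.mem_range, hM] at hv
  by_cases h1 : v = u0 ∨ mask &&& (1 <<< v) ≠ 0
  · rw [if_pos h1, if_pos h1]; exact hr
  · rw [if_neg h1, if_neg h1]
    by_cases h2 : (if ri = 0 then bi < unf.getD v 0 else unf.getD v 0 < bi)
    · rw [if_pos h2, if_pos h2]
      have hnm : (mask ||| (1 <<< u0) ||| (1 <<< v)) < 2 ^ M := by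
        have hb1 : (1 <<< u0) < 2 ^ M := by
          rw [Nat.shiftLeft_eq, one_mul]; exact Nat.pow_lt_pow_right one_lt_two hu0
        have hb2 : (1 <<< v) < 2 ^ M := by
          rw [Nat.shiftLeft_eq, one_mul]; exact Nat.pow_lt_pow_right one_lt_two hv
        exact Nat.or_lt_two_pow (Nat.or_lt_two_pow hmask hb1) hb2
      exact pvRel_bump hr _ hnm x
    · rw [if_neg h2, if_neg h2]; exact hr

theorem pvRel_empty_zeros (M : Nat) : pvRel M PySem.Dict.empty (List.replicate (2 ^ M) 0) := by
  refine ⟨by simp, by simp [PySem.Dict.keys_empty], by simp [PySem.Dict.keys_empty], ?_⟩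
  intro m
  rw [PySem.Dict.getD_empty]
  simp only [List.getD, List.getElem?_replicate]
  split <;> rfl

-- ---- the position dict is list.index ----

theorem pv_pos_aux (b : Int) : ∀ (l : List Int) (d : PySem.Dict Int Nat), l.Nodup →
    (∀ x ∈ l, d.contains x = false) →
    (l.foldl (fun d x => PySem.Dict.insert d x d.size) d).get? b
      = if d.contains b then d.get? b else (PySem.List.index? l b).map (· + d.size) := by
  intro l
  induction l with
  | nil =>
    intro d _ _
    simp only [List.foldl_nil]
    by_cases hc : d.contains b
    · rw [if_pos hc]
    · rw [if_neg hc]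
      have hc' : d.contains b = false := by
        cases h : d.contains b
        · rfl
        · exact absurd h hc
      rw [(PySem.Dict.get?_eq_none_iff_contains d b).mpr hc']
      simp [PySem.List.index?_eq_idxOf?]
  | cons a t ih =>
    intro d hnd hfresh
    have hfa : d.contains a = false := hfresh a (List.mem_cons_self)
    have hnott : a ∉ t := (List.nodup_cons.mp hnd).1
    have hsz : (PySem.Dict.insert d a d.size).size = d.size + 1 := by
      rw [PySem.Dict.size_insert, if_neg (by rw [hfa]; exact Bool.false_ne_true)]
    simp only [List.foldl_cons]
    have hfr : ∀ y ∈ t, (PySem.Dict.insert d a d.size).contains y = false := by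
      intro y hy
      rw [PySem.Dict.contains_insert]
      have hya : y ≠ a := fun h => hnott (h ▸ hy)
      simp [hya, hfresh y (List.mem_cons_of_mem _ hy)]
    rw [ih (PySem.Dict.insert d a d.size) (List.nodup_cons.mp hnd).2 hfr]
    by_cases hb : b = a
    · subst hb
      rw [if_pos (PySem.Dict.contains_insert_self d b d.size), if_neg (by rw [hfa]; exact Bool.false_ne_true),
            PySem.Dict.get?_insert_self, PySem.List.index?_cons_self]
      simp
    · have hci : (PySem.Dict.insert d a d.size).contains b = d.contains b := by
        rw [PySem.Dict.contains_insert]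
        simp [hb]
      rw [hci, PySem.List.index?_cons_of_ne t (fun h => hb h.symm)]
      by_cases hcb : d.contains b
      · rw [if_pos hcb, if_pos hcb, PySem.Dict.get?_insert_of_ne d _ hb]
      · rw [if_neg hcb, if_neg hcb, hsz, Option.map_map]
        congr 1
        funext i
        simp only [Function.comp_apply]
        omega

theorem pv_pos_get (l : List Int) (hnd : l.Nodup) (b : Int) :
    (l.foldl (fun d x => PySem.Dict.insert d x d.size) PySem.Dict.empty).get? b
      = PySem.List.index? l b := by
  rw [pv_pos_aux b l PySem.Dict.empty hnd (by intro x _; exact PySem.Dict.contains_empty x),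
      if_neg (by rw [PySem.Dict.contains_empty]; exact Bool.false_ne_true)]
  simp [PySem.Dict.size_empty]

-- ---- one row: the sparse dict transition simulates the dense list transition ----

theorem pvDStep_rel_some (M : Nat) (unf : List Int) (hM : unf.length = M)
    (ri bi : Int) (u0 : Nat) (hidx : PySem.List.index? unf bi = some u0)
    (d : PySem.Dict Nat Int) (L : List Int)
    (hndk : d.keys.Nodup) (hbound : ∀ k ∈ d.keys, k < 2 ^ M)
    (hpt : ∀ m : Nat, d.getD m 0 = L.getD m 0) :
    pvRel M
      (d.items.foldl (fun (ndp : PySem.Dict Nat Int) (p : Nat × Int) =>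
        if p.2 = 0 ∨ p.1 &&& (1 <<< u0) ≠ 0 then ndp
        else (List.range unf.length).foldl (fun (ndp : PySem.Dict Nat Int) (v : Nat) =>
          if v = u0 ∨ p.1 &&& (1 <<< v) ≠ 0 then ndp
          else
            let a := unf.getD v 0
            if (if ri = 0 then bi < a else a < bi) then
              let nm := p.1 ||| (1 <<< u0) ||| (1 <<< v)
              PySem.Dict.insert ndp nm (PySem.Int.mod (ndp.getD nm 0 + p.2) pvMOD)
            else ndp) ndp)
        PySem.Dict.empty)
      ((List.range (2 ^ unf.length)).foldl (fun nxt mask =>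
        if L.getD mask 0 = 0 ∨ mask &&& (1 <<< u0) ≠ 0 then nxt
        else pvInnerB unf ri bi (L.getD mask 0) u0 mask nxt)
        (List.replicate (2 ^ unf.length) 0)) := by
  obtain ⟨hu0len, hbval, _⟩ := PySem.List.getElem_of_index?_eq_some hidx
  rw [PySem.Dict.items_eq_map_keys d hndk 0, List.foldl_map]
  simp only [hpt]
  set Q : Nat → Prop := fun k => ¬(L.getD k 0 = 0 ∨ k &&& (1 <<< u0) ≠ 0) with hQ
  have hbodyD : ∀ (acc : PySem.Dict Nat Int), ∀ k ∈ d.keys,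
      (if L.getD k 0 = 0 ∨ k &&& (1 <<< u0) ≠ 0 then acc
       else (List.range unf.length).foldl (fun (ndp : PySem.Dict Nat Int) (v : Nat) =>
          if v = u0 ∨ k &&& (1 <<< v) ≠ 0 then ndp
          else
            let a := unf.getD v 0
            if (if ri = 0 then bi < a else a < bi) then
              let nm := k ||| (1 <<< u0) ||| (1 <<< v)
              PySem.Dict.insert ndp nm (PySem.Int.mod (ndp.getD nm 0 + L.getD k 0) pvMOD)
            else ndp) acc)
      = if Q k then (List.range unf.length).foldl (fun (ndp : PySem.Dict Nat Int) (v : Nat) =>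
          if v = u0 ∨ k &&& (1 <<< v) ≠ 0 then ndp
          else
            let a := unf.getD v 0
            if (if ri = 0 then bi < a else a < bi) then
              let nm := k ||| (1 <<< u0) ||| (1 <<< v)
              PySem.Dict.insert ndp nm (PySem.Int.mod (ndp.getD nm 0 + L.getD k 0) pvMOD)
            else ndp) acc
        else acc := by
    intro acc k _
    by_cases hs : L.getD k 0 = 0 ∨ k &&& (1 <<< u0) ≠ 0
    · rw [if_pos hs, if_neg (by rw [hQ]; exact fun hq => hq hs)]
    · rw [if_neg hs, if_pos (by rw [hQ]; exact hs)]
  have hbodyL : ∀ (acc : List Int), ∀ m ∈ List.range (2 ^ unf.length),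
      (if L.getD m 0 = 0 ∨ m &&& (1 <<< u0) ≠ 0 then acc
       else pvInnerB unf ri bi (L.getD m 0) u0 m acc)
      = if Q m then pvInnerB unf ri bi (L.getD m 0) u0 m acc else acc := by
    intro acc m _
    by_cases hs : L.getD m 0 = 0 ∨ m &&& (1 <<< u0) ≠ 0
    · rw [if_pos hs, if_neg (by rw [hQ]; exact fun hq => hq hs)]
    · rw [if_neg hs, if_pos (by rw [hQ]; exact hs)]
  rw [PySem.List.foldl_congr_mem _ _ _ _ hbodyD,
      PySem.List.foldl_congr_mem _ _ _ _ hbodyL,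
      PySem.List.foldl_ite_eq_foldl_filter Q _ _ _,
      PySem.List.foldl_ite_eq_foldl_filter Q _ _ _]
  have hperm : ((List.range (2 ^ unf.length)).filter (fun k => decide (Q k))).Perm
      (d.keys.filter (fun k => decide (Q k))) := by
    rw [List.perm_ext_iff_of_nodup (List.Nodup.filter _ List.nodup_range)
      (List.Nodup.filter _ hndk)]
    intro k
    simp only [List.mem_filter, List.mem_range, decide_eq_true_eq]
    constructor
    · rintro ⟨_, hq⟩
      refine ⟨?_, hq⟩
      have hnz : L.getD k 0 ≠ 0 := by rw [hQ] at hq; push_neg at hq; exact hq.1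
      have hdz : d.getD k 0 ≠ 0 := by rw [hpt k]; exact hnz
      by_cases hc : d.contains k
      · exact (PySem.Dict.contains_iff_mem_keys d k).mp hc
      · exact absurd (PySem.Dict.getD_of_not_contains d 0
          (by cases h : d.contains k; rfl; exact absurd h hc)) hdz
    · rintro ⟨hk, hq⟩
      refine ⟨?_, hq⟩
      rw [hM]
      exact hbound k hk
  have hcommL : ∀ (b : List Int) (m1 m2 : Nat),
      pvInnerB unf ri bi (L.getD m2 0) u0 m2 (pvInnerB unf ri bi (L.getD m1 0) u0 m1 b)
        = pvInnerB unf ri bi (L.getD m1 0) u0 m1 (pvInnerB unf ri bi (L.getD m2 0) u0 m2 b) :=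
    fun b m1 m2 => pvInnerB_comm unf ri bi _ _ u0 m2 m1 b
  rw [foldl_perm_of_comm _ hcommL hperm]
  refine pvRel_foldl M _ _ _ ?_ PySem.Dict.empty _ (hM ▸ pvRel_empty_zeros M)
  intro dd LL k hk hr
  rw [List.mem_filter] at hk
  have hkM : k < 2 ^ M := hbound k hk.1
  exact pvRel_inner M unf hM ri bi (L.getD k 0) u0 (by omega) k hkM hr

theorem pvDStep_rel (M : Nat) (unf : List Int) (hM : unf.length = M)
    (pos : PySem.Dict Int Nat) (hpos : ∀ b, pos.get? b = PySem.List.index? unf b)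
    (ri bi : Int) {d : PySem.Dict Nat Int} {L : List Int} (h : pvRel M d L) :
    pvRel M (pvDStep unf pos ri bi d) (pvStepB unf ri bi L) := by
  obtain ⟨hlen, hndk, hbound, hpt⟩ := h
  rw [pvDStep, pvStepB, hpos bi]
  cases hidx : PySem.List.index? unf bi with
  | none => rw [hM]; exact pvRel_empty_zeros M
  | some u0 => exact pvDStep_rel_some M unf hM ri bi u0 hidx d L hndk hbound hpt

-- ---- the final modular sums agree ----

theorem pv_foldl_mod (l : List Int) : ∀ (a : Int),
    l.foldl (fun r v => PySem.Int.mod (r + v) pvMOD) (PySem.Int.mod a pvMOD)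
      = PySem.Int.mod (a + l.sum) pvMOD := by
  induction l with
  | nil => intro a; simp
  | cons v t ih =>
    intro a
    simp only [List.foldl_cons, List.sum_cons]
    rw [show PySem.Int.mod (PySem.Int.mod a pvMOD + v) pvMOD = PySem.Int.mod (a + v) pvMOD from
      pv_mod_add_mod a v, ih (a + v), add_assoc]

theorem pv_foldl_mod_zero (l : List Int) :
    l.foldl (fun r v => PySem.Int.mod (r + v) pvMOD) 0 = PySem.Int.mod l.sum pvMOD := by
  have h := pv_foldl_mod l 0
  rw [show PySem.Int.mod 0 pvMOD = 0 from by decide, zero_add] at h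
  exact h

theorem pv_sum_filter (p : Nat → Prop) [DecidablePred p] (f : Nat → Int) :
    ∀ (l : List Nat), (∀ x ∈ l, ¬ p x → f x = 0) →
    (l.map f).sum = ((l.filter (fun x => decide (p x))).map f).sum := by
  intro l
  induction l with
  | nil => intro _; rfl
  | cons a t ih =>
    intro h
    by_cases ha : p a
    · rw [List.map_cons, List.sum_cons, List.filter_cons_of_pos (by simpa using ha),
          List.map_cons, List.sum_cons, ih (fun x hx => h x (List.mem_cons_of_mem _ hx))]
    · rw [List.map_cons, List.sum_cons, h a List.mem_cons_self ha,
          List.filter_cons_of_neg (by simpa using ha),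
          ih (fun x hx => h x (List.mem_cons_of_mem _ hx)), zero_add]

-- ---- main equivalence ----

theorem pv_main (N : Int) (C R B : List Int) :
    count_valid_permutations N C R B = count_valid_permutations_alt N C R B := by
  simp only [count_valid_permutations, count_valid_permutations_alt]
  have hnd0 : (PySem.List.pyRange 1 (2 * N + 1) 1).Nodup := PySem.List.nodup_pyRange_one 1 (2 * N + 1)
  have huf : PySem.Set.diff (PySem.Set.ofList (PySem.List.pyRange 1 (2 * N + 1) 1))
      (PySem.Set.ofList (C.filter (fun c => c ≠ -1)))
      = (PySem.List.pyRange 1 (2 * N + 1) 1).filter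
          (fun x => ¬ PySem.Set.contains (PySem.Set.ofList (C.filter (fun c => c ≠ -1))) x) := by
    rw [PySem.Set.ofList_eq_self_of_nodup _ hnd0]
    simp [PySem.Set.diff]
  rw [huf]
  set unf : List Int := (PySem.List.pyRange 1 (2 * N + 1) 1).filter
      (fun x => ¬ PySem.Set.contains (PySem.Set.ofList (C.filter (fun c => c ≠ -1))) x) with hU
  have hnd : unf.Nodup := List.Nodup.filter _ hnd0
  have hstep : (fun (cur : List Int) (i : Nat) => pvStepA unf (R.getD i 0) (B.getD i 0) cur)
      = (fun cur i => pvStepB unf (R.getD i 0) (B.getD i 0) cur) := by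
    funext cur i
    exact pvStep_eq unf hnd _ _ cur
  rw [hstep]
  have hpos : ∀ b, (unf.foldl (fun d x => PySem.Dict.insert d x d.size) PySem.Dict.empty).get? b
      = PySem.List.index? unf b := pv_pos_get unf hnd
  -- simulate the row loop
  have h0 : pvRel unf.length (PySem.Dict.insert PySem.Dict.empty 0 1)
      ((List.replicate (2 ^ unf.length) 0).set 0 1) := by
    obtain ⟨hlen, hndk, hbound, hpt⟩ := pvRel_empty_zeros unf.length
    refine ⟨by rw [List.length_set]; exact hlen, PySem.Dict.nodup_keys_insert _ _ _ hndk, ?_, ?_⟩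
    · intro k hk
      rcases (PySem.Dict.mem_keys_insert _ 0 k _).mp hk with rfl | hk'
      · exact Nat.two_pow_pos unf.length
      · exact hbound k hk'
    · intro m
      rw [PySem.Dict.getD_insert]
      by_cases hm : m = 0
      · subst hm
        rw [if_pos rfl]
        simp [List.getD, List.getElem?_set_self
          (show 0 < (List.replicate (2 ^ unf.length) (0:Int)).length by
            simp [Nat.two_pow_pos])]
      · rw [if_neg hm, hpt m]
        simp [List.getD, List.getElem?_set_ne (Ne.symm hm)]
  have hrel : pvRel unf.length
      ((List.range N.toNat).foldl
        (fun dp i => pvDStep unf (unf.foldl (fun d x => PySem.Dict.insert d x d.size) PySem.Dict.empty)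
          (R.getD i 0) (B.getD i 0) dp)
        (PySem.Dict.insert PySem.Dict.empty 0 1))
      ((List.range N.toNat).foldl
        (fun cur i => pvStepB unf (R.getD i 0) (B.getD i 0) cur)
        ((List.replicate (2 ^ unf.length) 0).set 0 1)) := by
    refine pvRel_foldl unf.length _ _ _ ?_ _ _ h0
    intro d L i _ hr
    exact pvDStep_rel unf.length unf rfl _ hpos (R.getD i 0) (B.getD i 0) hr
  set dpD := (List.range N.toNat).foldl
      (fun dp i => pvDStep unf (unf.foldl (fun d x => PySem.Dict.insert d x d.size) PySem.Dict.empty)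
        (R.getD i 0) (B.getD i 0) dp)
      (PySem.Dict.insert PySem.Dict.empty 0 1) with hdpD
  set dpL := (List.range N.toNat).foldl
      (fun cur i => pvStepB unf (R.getD i 0) (B.getD i 0) cur)
      ((List.replicate (2 ^ unf.length) 0).set 0 1) with hdpL
  obtain ⟨hlen, hndk, hbound, hpt⟩ := hrel
  -- A's final fold
  have hA : (List.range (2 ^ unf.length)).foldl
      (fun r mask => PySem.Int.mod (r + dpL.getD mask 0) pvMOD) 0
      = PySem.Int.mod (((List.range (2 ^ unf.length)).map (fun m => dpL.getD m 0)).sum) pvMOD := by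
    rw [show (fun (r : Int) (mask : Nat) => PySem.Int.mod (r + dpL.getD mask 0) pvMOD)
          = (fun r v => (fun (r v : Int) => PySem.Int.mod (r + v) pvMOD) r
              ((fun (m : Nat) => dpL.getD m 0) v)) from rfl,
        ← List.foldl_map (f := fun (m : Nat) => dpL.getD m 0)
          (g := fun (r v : Int) => PySem.Int.mod (r + v) pvMOD)]
    exact pv_foldl_mod_zero _
  -- B's final fold
  have hB : dpD.values.foldl (fun r v => PySem.Int.mod (r + v) pvMOD) 0
      = PySem.Int.mod ((dpD.keys.map (fun k => dpL.getD k 0)).sum) pvMOD := by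
    rw [PySem.Dict.values_eq_map_keys dpD hndk 0,
        List.map_congr_left (fun k _ => hpt k)]
    exact pv_foldl_mod_zero _
  rw [hA, hB]
  -- the two sums are equal
  congr 1
  have hz : ∀ m ∈ List.range (2 ^ unf.length), ¬ m ∈ dpD.keys → (fun (m : Nat) => dpL.getD m 0) m = 0 := by
    intro m _ hm
    show dpL.getD m 0 = 0
    rw [← hpt m]
    refine PySem.Dict.getD_of_not_contains dpD 0 ?_
    cases h : dpD.contains m
    · rfl
    · exact absurd ((PySem.Dict.contains_iff_mem_keys dpD m).mp h) hm
  rw [pv_sum_filter (fun m => m ∈ dpD.keys) (fun m => dpL.getD m 0) (List.range (2 ^ unf.length)) hz]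
  refine List.Perm.sum_eq (List.Perm.map _ ?_)
  rw [List.perm_ext_iff_of_nodup (List.Nodup.filter _ List.nodup_range) hndk]
  intro k
  simp only [List.mem_filter, List.mem_range, decide_eq_true_eq]
  exact ⟨fun h => h.2, fun h => ⟨hbound k h, h⟩⟩

-- ===== VERDICT (by name: the statement is the Claim_ definition above) =====
theorem count_valid_permutations_spec : Claim_equal_count_valid_permutations := by
  intro N C R B _hdom _hpre
  unfold Spec_count_valid_permutations
  exact pv_main N C R B
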